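-- pv_equiv track=rewrite | github.com/nischalneupanee/ai-learning-mentor-bot | utils/text_analysis.py | update_concept_frequency
-- ===== SOURCE A (Python) =====
-- def update_concept_frequency(
--     existing_freq: dict[str, int],
--     new_concepts: list[str]
-- ) -> dict[str, int]:
--     """
--     Update concept frequency map with new concepts.
--     """
--     updated = existing_freq.copy()
--     for concept in new_concepts:
--         updated[concept] = updated.get(concept, 0) + 1
--     return updated
-- ===== SOURCE B (Python) =====
-- def update_concept_frequency(
--     existing_freq: dict[str, int],
--     new_concepts: list[str]
-- ) -> dict[str, int]:
--     """
--     Update concept frequency map with new concepts.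
--     Aggregate-then-merge: tally the new concepts into a separate frequency
--     table first, then rebuild the result in one pass over the existing map
--     (adding each key's tallied count) and append the genuinely new concepts
--     with their totals, in first-occurrence order.
--     """
--     counts = {}
--     for concept in new_concepts:
--         counts[concept] = counts.get(concept, 0) + 1
--     merged = {k: v + counts.get(k, 0) for k, v in existing_freq.items()}
--     merged.update({k: n for k, n in counts.items() if k not in existing_freq})
--     return merged
-- ===== Notes on version B (the rewrite author's own statement) =====
-- stated objective: alternative
-- what changed: B aggregates first: it tallies new_concepts into a separate frequency table, then rebuilds the result in one comprehension pass over existing_freq (adding each key's tallied count) and appends the genuinely new concepts with their totals via update, instead of A's one in-place increment per raw list element; existing values (including 0 or negative) are preserved exactly.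
import Mathlib
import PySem

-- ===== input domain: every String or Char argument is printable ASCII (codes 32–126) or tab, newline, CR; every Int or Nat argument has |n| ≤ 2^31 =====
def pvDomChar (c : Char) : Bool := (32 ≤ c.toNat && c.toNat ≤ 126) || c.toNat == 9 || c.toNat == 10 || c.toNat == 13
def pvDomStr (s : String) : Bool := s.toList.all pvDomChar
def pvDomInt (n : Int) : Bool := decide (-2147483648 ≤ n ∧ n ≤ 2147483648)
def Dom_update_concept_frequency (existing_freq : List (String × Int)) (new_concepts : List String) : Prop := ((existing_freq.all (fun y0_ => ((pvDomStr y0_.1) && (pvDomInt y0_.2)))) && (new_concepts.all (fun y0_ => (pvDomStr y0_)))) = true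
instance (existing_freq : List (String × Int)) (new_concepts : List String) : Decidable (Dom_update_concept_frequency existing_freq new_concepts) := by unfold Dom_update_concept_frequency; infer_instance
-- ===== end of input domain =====

-- B aggregates first (distinct concepts in first-occurrence order, one addition of the
-- total count each) instead of A's one increment per raw element; return values proved equal.


-- ===== PORT A =====
-- updated = existing_freq.copy(); for concept in new_concepts: updated[concept] = updated.get(concept, 0) + 1
def update_concept_frequency (existing_freq : List (String × Int)) (new_concepts : List String) : List (String × Int) :=
  (new_concepts.foldl (fun d c => d.insert c (d.getD c 0 + 1)) (PySem.Dict.ofList existing_freq)).items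

-- ===== PORT B =====
-- counts = {}; for concept in new_concepts: counts[concept] = counts.get(concept, 0) + 1
-- merged = {k: v + counts.get(k, 0) for k, v in existing_freq.items()}
-- merged.update({k: n for k, n in counts.items() if k not in existing_freq}); return merged
def update_concept_frequency_alt (existing_freq : List (String × Int)) (new_concepts : List String) : List (String × Int) :=
  let counts := new_concepts.foldl (fun d c => d.insert c (d.getD c 0 + 1)) PySem.Dict.empty
  let base := PySem.Dict.ofList existing_freq
  let merged := PySem.Dict.ofList (base.items.map (fun p => (p.1, p.2 + counts.getD p.1 0)))
  (merged.update (counts.items.filter (fun p => !(base.contains p.1)))).items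

-- ===== PRECONDITION & SPEC =====
def Spec_update_concept_frequency (existing_freq : List (String × Int)) (new_concepts : List String) (out : List (String × Int)) : Prop := out = update_concept_frequency_alt existing_freq new_concepts
instance (existing_freq : List (String × Int)) (new_concepts : List String) (out : List (String × Int)) : Decidable (Spec_update_concept_frequency existing_freq new_concepts out) := by unfold Spec_update_concept_frequency; infer_instance

-- ===== CLAIM (what is proved, stated in full; the proofs are below) =====
def Claim_equal_update_concept_frequency : Prop := ∀ (existing_freq : List (String × Int)) (new_concepts : List String), Dom_update_concept_frequency existing_freq new_concepts → Spec_update_concept_frequency existing_freq new_concepts (update_concept_frequency existing_freq new_concepts)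


-- ===== LEMMAS AND PROOFS =====

-- folding additions over pairs whose keys avoid x leaves the value at x alone
theorem pv_getD_fold (l : List (String × Int)) (d : PySem.Dict String Int) (x : String)
    (h : x ∉ l.map Prod.fst) :
    (l.foldl (fun d p => d.insert p.1 (d.getD p.1 0 + p.2)) d).getD x 0 = d.getD x 0 := by
  induction l generalizing d with
  | nil => rfl
  | cons p t ih =>
    simp only [List.map_cons, List.mem_cons, not_or] at h
    simp only [List.foldl_cons]
    rw [ih _ h.2, PySem.Dict.getD_insert_of_ne d _ 0 h.1]

-- the overwrite-in-place substitution at key x does not disturb membership tests at k ≠ x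
theorem pv_any_map_ne (l : List (String × Int)) (x k : String) (b : Int) :
    ((l.map (fun p => if p.1 == x then (x, b) else p)).any (fun p => p.1 == k))
      = l.any (fun p => p.1 == k) := by
  induction l with
  | nil => rfl
  | cons p t ih =>
    simp only [List.map_cons, List.any_cons, ih]
    by_cases h : (p.1 == x) = true
    · have : p.1 = x := by simpa using h
      simp [this]
    · simp [h]

-- insert unfolded, one step, for a present / absent key
theorem pv_insert_pos (D : PySem.Dict String Int) (k : String) (c : Int)
    (h : D.contains k = true) :
    D.insert k c = PySem.Dict.mk (D.items.map (fun p => if p.1 == k then (k, c) else p)) := by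
  simp only [PySem.Dict.insert, h, if_true]

theorem pv_insert_neg (D : PySem.Dict String Int) (k : String) (c : Int)
    (h : D.contains k = false) :
    D.insert k c = PySem.Dict.mk (D.items ++ [(k, c)]) := by
  simp only [PySem.Dict.insert, h, Bool.false_eq_true, if_false]

-- two inserts at distinct keys commute when the first key is already present (overwrite in place)
theorem pv_insert_insert_comm (d : PySem.Dict String Int) (x k : String) (b c : Int)
    (hx : d.contains x = true) (hne : k ≠ x) :
    (d.insert x b).insert k c = (d.insert k c).insert x b := by
  have hkx : (k == x) = false := by simp [hne]
  have hxk : (x == k) = false := by simp [Ne.symm hne]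
  have e1 := pv_insert_pos d x b hx
  by_cases hk : d.contains k = true
  · have e2 := pv_insert_pos d k c hk
    have c1 : (d.insert x b).contains k = true := by
      rw [e1]; simpa [PySem.Dict.contains] using (pv_any_map_ne d.items x k b).trans hk
    have c2 : (d.insert k c).contains x = true := by
      rw [e2]; simpa [PySem.Dict.contains] using (pv_any_map_ne d.items k x c).trans hx
    rw [pv_insert_pos _ k c c1, pv_insert_pos _ x b c2, e1, e2]
    simp only [List.map_map]
    congr 1
    apply List.map_congr_left
    intro p _
    simp only [Function.comp]
    by_cases h1 : (p.1 == x) = true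
    · have hp : p.1 = x := by simpa using h1
      simp [hp, hxk]
    · by_cases h2 : (p.1 == k) = true
      · have hp : p.1 = k := by simpa using h2
        simp [hp, hkx]
      · simp [h1, h2]
  · have hk' : d.contains k = false := by simpa using hk
    have e2 := pv_insert_neg d k c hk'
    have c1 : (d.insert x b).contains k = false := by
      rw [e1]; simpa [PySem.Dict.contains] using (pv_any_map_ne d.items x k b).trans hk'
    have c2 : (d.insert k c).contains x = true := by
      rw [e2]
      simp only [PySem.Dict.contains, List.any_append, List.any_cons, List.any_nil,
        Bool.or_eq_true]
      left
      simpa [PySem.Dict.contains, List.any_eq_true] using hx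
    rw [pv_insert_neg _ k c c1, pv_insert_pos _ x b c2, e1, e2]
    simp [hne]

-- inserting at a key already present commutes with folding additions at other keys
theorem pv_fold_insert (l : List (String × Int)) (D : PySem.Dict String Int) (x : String) (b : Int)
    (hl : x ∉ l.map Prod.fst) (hx : D.contains x = true) :
    l.foldl (fun d p => d.insert p.1 (d.getD p.1 0 + p.2)) (D.insert x b)
      = (l.foldl (fun d p => d.insert p.1 (d.getD p.1 0 + p.2)) D).insert x b := by
  induction l generalizing D with
  | nil => rfl
  | cons p t ih =>
    simp only [List.map_cons, List.mem_cons, not_or] at hl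
    simp only [List.foldl_cons]
    rw [PySem.Dict.getD_insert_of_ne D b 0 (Ne.symm hl.1),
        pv_insert_insert_comm D x p.1 b _ hx (Ne.symm hl.1),
        ih _ hl.2]
    rw [PySem.Dict.contains_insert]
    simp [hx]

-- the substitution at x is the identity on pairs whose keys avoid x
theorem pv_map_id (t : List (String × Int)) (x : String) (n : Int)
    (h : x ∉ t.map Prod.fst) :
    t.map (fun p => if p.1 == x then (x, n) else p) = t := by
  induction t with
  | nil => rfl
  | cons p t ih =>
    simp only [List.map_cons, List.mem_cons, not_or] at h
    rw [List.map_cons, if_neg (by simp only [beq_iff_eq]; exact fun e => h.1 e.symm), ih h.2]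

-- adding per-pair with x's value bumped by one = adding per-pair, then one increment at x
theorem pv_fold_bump (l : List (String × Int)) (d : PySem.Dict String Int) (x : String) (n : Int)
    (hnd : (l.map Prod.fst).Nodup) (hget : (PySem.Dict.mk l).get? x = some n) :
    (l.map (fun p => if p.1 == x then (x, n + 1) else p)).foldl
        (fun d p => d.insert p.1 (d.getD p.1 0 + p.2)) d
      = (l.foldl (fun d p => d.insert p.1 (d.getD p.1 0 + p.2)) d).insert x
          ((l.foldl (fun d p => d.insert p.1 (d.getD p.1 0 + p.2)) d).getD x 0 + 1) := by
  induction l generalizing d with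
  | nil => simp [PySem.Dict.get?] at hget
  | cons p t ih =>
    have hnd' := hnd
    simp only [List.map_cons, List.nodup_cons] at hnd'
    by_cases hpx : (p.1 == x) = true
    · have hp : p.1 = x := by simpa using hpx
      have hnv : n = p.2 := by
        simp only [PySem.Dict.get?, List.find?, hpx] at hget
        simpa using hget.symm
      have hxt : x ∉ t.map Prod.fst := hp ▸ hnd'.1
      simp only [List.map_cons, List.foldl_cons, pv_map_id t x (n + 1) hxt, hp,
        beq_self_eq_true, if_true]
      have harith : d.getD x 0 + (n + 1) = (d.getD x 0 + p.2) + 1 := by rw [hnv]; ring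
      rw [harith, ← PySem.Dict.insert_insert_self d x (d.getD x 0 + p.2) ((d.getD x 0 + p.2) + 1)]
      rw [pv_fold_insert t (d.insert x (d.getD x 0 + p.2)) x ((d.getD x 0 + p.2) + 1) hxt
            (by rw [PySem.Dict.contains_insert]; simp)]
      rw [pv_getD_fold t (d.insert x (d.getD x 0 + p.2)) x hxt,
          PySem.Dict.getD_insert_self]
    · have hget' : (PySem.Dict.mk t).get? x = some n := by
        simpa [PySem.Dict.get?, List.find?, hpx] using hget
      simp only [List.map_cons, List.foldl_cons, if_neg hpx]
      exact ih _ hnd'.2 hget'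

-- A's increment loop computes the per-item addition loop over Counter(nc).items
theorem pv_main (nc : List String) (d : PySem.Dict String Int) :
    nc.foldl (fun d c => d.insert c (d.getD c 0 + 1)) d
      = (PySem.Dict.counter nc).items.foldl (fun d p => d.insert p.1 (d.getD p.1 0 + p.2)) d := by
  induction nc using List.reverseRecOn with
  | nil => rfl
  | append_singleton l c ih =>
    rw [List.foldl_append, List.foldl_cons, List.foldl_nil, ih,
        PySem.Dict.counter_append_singleton]
    simp only [PySem.Dict.modify]
    by_cases hc : (PySem.Dict.counter l).contains c = true
    · obtain ⟨n, hn⟩ : ∃ n, (PySem.Dict.counter l).get? c = some n := by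
        cases hq : (PySem.Dict.counter l).get? c with
        | some n => exact ⟨n, rfl⟩
        | none =>
          exfalso
          simp only [PySem.Dict.contains, List.any_eq_true] at hc
          obtain ⟨p, hp, hpc⟩ := hc
          simp only [PySem.Dict.get?, Option.map_eq_none_iff, List.find?_eq_none] at hq
          exact absurd hpc (by simpa using hq p hp)
      have hg : (PySem.Dict.counter l).getD c 0 = n := by simp [PySem.Dict.getD, hn]
      have e1 : (PySem.Dict.counter l).insert c ((PySem.Dict.counter l).getD c 0 + 1)
          = PySem.Dict.mk ((PySem.Dict.counter l).items.map
              (fun p => if p.1 == c then (c, n + 1) else p)) := by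
        rw [hg, pv_insert_pos _ c (n + 1) hc]
      rw [e1]
      have hnd : ((PySem.Dict.counter l).items.map Prod.fst).Nodup := by
        simpa [PySem.Dict.keys] using PySem.Dict.nodup_keys_counter l
      exact (pv_fold_bump (PySem.Dict.counter l).items d c n hnd hn).symm
    · have hc' : (PySem.Dict.counter l).contains c = false := by simpa using hc
      have hmem : ∀ p ∈ (PySem.Dict.counter l).items, ¬(p.1 == c) = true := by
        simpa [PySem.Dict.contains, List.any_eq_false] using hc'
      have hf : List.find? (fun p => p.1 == c) (PySem.Dict.counter l).items = none :=
        List.find?_eq_none.mpr hmem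
      have hg : (PySem.Dict.counter l).getD c 0 = 0 := by
        simp [PySem.Dict.getD, PySem.Dict.get?, hf]
      have e1 : (PySem.Dict.counter l).insert c ((PySem.Dict.counter l).getD c 0 + 1)
          = PySem.Dict.mk ((PySem.Dict.counter l).items ++ [(c, 0 + 1)]) := by
        rw [hg, pv_insert_neg _ c (0 + 1) hc']
      rw [e1]
      have hxt : c ∉ (PySem.Dict.counter l).items.map Prod.fst := by
        intro hmem'
        obtain ⟨p, hp, hpc⟩ := List.mem_map.mp hmem'
        exact absurd (by simp [hpc] : (p.1 == c) = true) (hmem p hp)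
      show _ = List.foldl _ d ((PySem.Dict.counter l).items ++ [(c, 0 + 1)])
      rw [List.foldl_append, List.foldl_cons, List.foldl_nil,
          pv_getD_fold (PySem.Dict.counter l).items d c hxt]
      norm_num

-- a fst-preserving map does not change key membership tests
theorem pv_any_map_fst (L : List (String × Int)) (g : String × Int → Int) (k : String) :
    ((L.map (fun p => (p.1, g p))).any (fun p => p.1 == k)) = L.any (fun p => p.1 == k) := by
  rw [List.any_map]; rfl

-- nor where the first match for a key sits
theorem pv_find_map_fst (L : List (String × Int)) (g : String × Int → Int) (k : String) :
    List.find? (fun p => p.1 == k) (L.map (fun p => (p.1, g p)))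
      = (List.find? (fun p => p.1 == k) L).map (fun p => (p.1, g p)) := by
  rw [List.find?_map]; rfl

-- a filtered sublist of pairs whose keys avoid q cannot test positive at q
theorem pv_any_filter_false (l : List (String × Int)) (q : String) (pr : String × Int → Bool)
    (h : q ∉ l.map Prod.fst) :
    (l.filter pr).any (fun p => p.1 == q) = false := by
  rw [List.any_eq_false]
  intro p hp hpq
  exact h (List.mem_map.mpr ⟨p, (List.mem_filter.mp hp).1, by simpa using hpq⟩)

-- folding the per-pair additions of l into base = existing entries each bumped by l's
-- value at its key, then l's genuinely new pairs appended in order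
theorem pv_fold_addp_items (l : List (String × Int)) (base : PySem.Dict String Int)
    (hl : (l.map Prod.fst).Nodup) (hb : (base.items.map Prod.fst).Nodup) :
    (l.foldl (fun d p => d.insert p.1 (d.getD p.1 0 + p.2)) base).items
      = base.items.map (fun p => (p.1, p.2 + (PySem.Dict.mk l).getD p.1 0))
        ++ l.filter (fun p => !(base.contains p.1)) := by
  induction l using List.reverseRecOn with
  | nil =>
    simp [PySem.Dict.getD, PySem.Dict.get?]
  | append_singleton l q ih =>
    have hl2 : (l.map Prod.fst).Nodup ∧ q.1 ∉ l.map Prod.fst := by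
      rw [List.map_append] at hl
      have h1 := List.Nodup.of_append_left hl
      have h2 := (List.nodup_append.mp hl).2.2
      exact ⟨h1, fun hm => (h2 q.1 hm q.1 (by simp)) rfl⟩
    have hF := ih hl2.1
    rw [List.foldl_append, List.foldl_cons, List.foldl_nil]
    have hgl : (PySem.Dict.mk l).getD q.1 0 = 0 := by
      have hfind : List.find? (fun p => p.1 == q.1) l = none :=
        List.find?_eq_none.mpr (fun p hp => by
          simp only [beq_iff_eq]
          intro he
          exact hl2.2 (List.mem_map.mpr ⟨p, hp, he⟩))
      simp [PySem.Dict.getD, PySem.Dict.get?, hfind]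
    have hSany : ((l.filter (fun p => !(base.contains p.1))).any (fun p => p.1 == q.1)) = false :=
      pv_any_filter_false l q.1 _ hl2.2
    by_cases hq : base.contains q.1 = true
    · -- q's key already exists in base: the insert overwrites in place
      obtain ⟨pv, hpv⟩ : ∃ v, base.get? q.1 = some v := by
        cases hg : base.get? q.1 with
        | some v => exact ⟨v, rfl⟩
        | none =>
          rw [PySem.Dict.contains_eq_isSome_get?, hg] at hq
          simp at hq
      have hfb : List.find? (fun p => p.1 == q.1) base.items = some (q.1, pv) := by
        simp only [PySem.Dict.get?] at hpv
        cases hfind : List.find? (fun p => p.1 == q.1) base.items with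
        | none => rw [hfind] at hpv; simp at hpv
        | some p0 =>
          rw [hfind] at hpv
          have h1 : p0.1 = q.1 := by simpa using List.find?_some hfind
          have h2 : p0.2 = pv := by simpa using hpv
          rw [← h1, ← h2]
      have hgF : (l.foldl (fun d p => d.insert p.1 (d.getD p.1 0 + p.2)) base).getD q.1 0 = pv := by
        rw [PySem.Dict.getD_eq_get?_getD]
        unfold PySem.Dict.get?
        rw [hF, List.find?_append,
          pv_find_map_fst base.items (fun p => p.2 + (PySem.Dict.mk l).getD p.1 0) q.1, hfb]
        simp [hgl]
      have hcF : (l.foldl (fun d p => d.insert p.1 (d.getD p.1 0 + p.2)) base).contains q.1 = true := by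
        simp only [PySem.Dict.contains, hF, List.any_append,
          pv_any_map_fst base.items (fun p => p.2 + (PySem.Dict.mk l).getD p.1 0) q.1]
        simp only [Bool.or_eq_true]
        left
        exact hq
      rw [pv_insert_pos _ q.1 _ hcF, hgF]
      simp only [hF, List.map_append]
      rw [pv_map_id (l.filter (fun p => !(base.contains p.1))) q.1 (pv + q.2)
            (by intro hm; obtain ⟨p, hp, hpe⟩ := List.mem_map.mp hm
                exact absurd (by simp [hpe] : (p.1 == q.1) = true)
                  (by rw [List.any_eq_false] at hSany; simpa using hSany p hp))]
      rw [List.filter_append]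
      have hfq : [q].filter (fun p => !(base.contains p.1)) = [] := by simp [hq]
      rw [hfq, List.append_nil, List.map_map]
      congr 1
      apply List.map_congr_left
      intro p hp
      simp only [Function.comp]
      by_cases hpq : (p.1 == q.1) = true
      · have hp1 : p.1 = q.1 := by simpa using hpq
        have hp2 : p.2 = pv := by
          have := PySem.Dict.get?_of_mem_items (d := base) (k := p.1) (v := p.2)
            hp (by simpa [PySem.Dict.keys] using hb)
          rw [hp1, hpv] at this
          exact (Option.some.inj this).symm
        have hgq : (PySem.Dict.mk (l ++ [q])).getD q.1 0 = q.2 := by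
          have hfind : List.find? (fun p => p.1 == q.1) l = none :=
            List.find?_eq_none.mpr (fun p hp => by
              simp only [beq_iff_eq]
              intro he
              exact hl2.2 (List.mem_map.mpr ⟨p, hp, he⟩))
          simp [PySem.Dict.getD, PySem.Dict.get?, List.find?_append, hfind]
        simp [hpq, hp1, hp2, hgq]
      · have hne : ¬ p.1 = q.1 := by simpa using hpq
        have hqp : (q.1 == p.1) = false := by
          simp only [beq_eq_false_iff_ne, ne_eq]
          exact fun e => hne e.symm
        have hgp : (PySem.Dict.mk (l ++ [q])).getD p.1 0 = (PySem.Dict.mk l).getD p.1 0 := by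
          simp only [PySem.Dict.getD, PySem.Dict.get?, List.find?_append]
          cases hfl : List.find? (fun r => r.1 == p.1) l with
          | some r => simp
          | none => simp [List.find?_cons, hqp]
        simp [hpq, hgp]
    · -- q's key is new to base: the insert appends
      have hq' : base.contains q.1 = false := by simpa using hq
      have hcF : (l.foldl (fun d p => d.insert p.1 (d.getD p.1 0 + p.2)) base).contains q.1 = false := by
        simp only [PySem.Dict.contains, hF, List.any_append,
          pv_any_map_fst base.items (fun p => p.2 + (PySem.Dict.mk l).getD p.1 0) q.1]
        simp only [Bool.or_eq_false_iff]
        exact ⟨hq', hSany⟩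
      have hgF : (l.foldl (fun d p => d.insert p.1 (d.getD p.1 0 + p.2)) base).getD q.1 0 = 0 :=
        PySem.Dict.getD_of_not_contains _ 0 hcF
      rw [pv_insert_neg _ q.1 _ hcF, hgF]
      simp only [hF, List.filter_append, List.append_assoc]
      have hfq : [q].filter (fun p => !(base.contains p.1)) = [q] := by simp [hq']
      rw [hfq]
      congr 1
      · apply List.map_congr_left
        intro p hp
        have hpq : (q.1 == p.1) = false := by
          simp only [beq_eq_false_iff_ne, ne_eq]
          intro he
          rw [PySem.Dict.contains, List.any_eq_false] at hq'
          exact hq' p hp (by simp [he])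
        have hgp : (PySem.Dict.mk (l ++ [q])).getD p.1 0 = (PySem.Dict.mk l).getD p.1 0 := by
          simp only [PySem.Dict.getD, PySem.Dict.get?, List.find?_append]
          cases hfl : List.find? (fun r => r.1 == p.1) l with
          | some r => simp
          | none => simp [List.find?_cons, hpq]
        rw [hgp]
      · simp

-- ===== VERDICT (by name: the statement is the Claim_ definition above) =====
theorem update_concept_frequency_spec : Claim_equal_update_concept_frequency := by
  intro ef nc _
  unfold Spec_update_concept_frequency update_concept_frequency update_concept_frequency_alt
  rw [pv_main, PySem.Dict.foldl_insert_getD_add_one_eq_counter]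
  have hbnd : ((PySem.Dict.ofList ef : PySem.Dict String Int).items.map Prod.fst).Nodup := by
    simpa [PySem.Dict.keys] using PySem.Dict.nodup_keys_ofList (κ := String) (ν := Int) ef
  have hknd : ((PySem.Dict.counter nc).items.map Prod.fst).Nodup := by
    simpa [PySem.Dict.keys] using PySem.Dict.nodup_keys_counter nc
  rw [pv_fold_addp_items (PySem.Dict.counter nc).items (PySem.Dict.ofList ef) hknd hbnd]
  -- right-hand side: {k: v + counts.get(k,0) …} then .update(new items)
  have hL : (PySem.Dict.ofList ((PySem.Dict.ofList ef : PySem.Dict String Int).items.map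
        (fun p => (p.1, p.2 + (PySem.Dict.counter nc).getD p.1 0)))).items
      = (PySem.Dict.ofList ef : PySem.Dict String Int).items.map
        (fun p => (p.1, p.2 + (PySem.Dict.counter nc).getD p.1 0)) := by
    simp only [PySem.Dict.ofList, PySem.Dict.update]
    rw [PySem.Dict.items_foldl_insert_fresh _ Prod.fst Prod.snd PySem.Dict.empty
          (fun a _ => PySem.Dict.contains_empty a.1)
          (by rw [List.map_map]; exact hbnd)]
    simp [PySem.Dict.empty, Function.comp_def]
  have hupd : ((PySem.Dict.ofList ((PySem.Dict.ofList ef : PySem.Dict String Int).items.map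
        (fun p => (p.1, p.2 + (PySem.Dict.counter nc).getD p.1 0)))).update
          ((PySem.Dict.counter nc).items.filter
            (fun p => !((PySem.Dict.ofList ef : PySem.Dict String Int).contains p.1)))).items
      = (PySem.Dict.ofList ef : PySem.Dict String Int).items.map
          (fun p => (p.1, p.2 + (PySem.Dict.counter nc).getD p.1 0))
        ++ (PySem.Dict.counter nc).items.filter
            (fun p => !((PySem.Dict.ofList ef : PySem.Dict String Int).contains p.1)) := by
    simp only [PySem.Dict.update]
    rw [PySem.Dict.items_foldl_insert_fresh _ Prod.fst Prod.snd _
          (fun a ha => by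
            have hfb : (PySem.Dict.ofList ef : PySem.Dict String Int).contains a.1 = false := by
              have := (List.mem_filter.mp ha).2
              simpa using this
            show PySem.Dict.contains _ a.1 = false
            rw [PySem.Dict.contains, hL,
              pv_any_map_fst _ (fun p => p.2 + (PySem.Dict.counter nc).getD p.1 0) a.1]
            exact hfb)
          ((List.Sublist.map Prod.fst ((PySem.Dict.counter nc).items.filter_sublist
              (p := fun p => !((PySem.Dict.ofList ef : PySem.Dict String Int).contains p.1)))).nodup hknd)]
    rw [hL]
    simp [Function.comp_def]
  rw [hupd]
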